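-- pv_equiv track=rewrite | github.com/Veretion/Decor | usors_for_image/radiator.py | fig_plus
-- ===== SOURCE A (Python) =====
-- def fig_plus(left, up, right, down, ost):
-- 	mass = []
--
-- 	left += ost
-- 	up += ost
-- 	right -= ost
-- 	down -= ost
--
-- 	# рисунок
-- 	ad = []
--
-- 	iscl = []  #
-- 	# for i in range(2):
-- 	# 	for ii in range(6):
-- 	# 		if [i, ii] not in iscl and ([i, ii] not in ad):
--
-- 	for i in range(2, 10):
-- 		for ii in range(2, 4):
-- 				ad.append([i, ii])
--
-- 	a = 14  # размер фигуры по x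
-- 	b = 14  # размер фигуры по y
-- 	# рисунок
--
-- 	b0 = 0
--
-- 	for x in range(right - left):
-- 		a0 = 0
-- 		for y in range(down - up):
--
-- 			if [a0, b0] in ad:
-- 				mass.append([left + x, up + y])
-- 			a0 += 1
-- 			if a0 > a:
-- 				a0 = 0
-- 		b0 += 1
-- 		if b0 > b:
-- 			b0 = 0
--
-- 	return mass
-- ===== SOURCE B (Python) =====
-- def fig_plus(left, up, right, down, ost):
--     left += ost
--     up += ost
--     right -= ost
--     down -= ost
--     xs = [x for x in range(right - left) if x % 15 in (2, 3)]
--     if not xs: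
--         return []
--     ys = [y for y in range(down - up) if 2 <= y % 15 <= 9]
--     return [[left + x, up + y] for x in xs for y in ys]
-- ===== Notes on version B (the rewrite author's own statement) =====
-- stated objective: simpler
-- what changed: Replaced the 16-entry 'ad' lookup table and the two incrementing/resetting counters by the closed-form periodicity x%15 in {2,3} and 2 <= y%15 <= 9: B precomputes the two lists of valid offsets once and emits their cartesian product, instead of scanning a list of pairs inside a counter-driven nested loop.
import Mathlib
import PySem

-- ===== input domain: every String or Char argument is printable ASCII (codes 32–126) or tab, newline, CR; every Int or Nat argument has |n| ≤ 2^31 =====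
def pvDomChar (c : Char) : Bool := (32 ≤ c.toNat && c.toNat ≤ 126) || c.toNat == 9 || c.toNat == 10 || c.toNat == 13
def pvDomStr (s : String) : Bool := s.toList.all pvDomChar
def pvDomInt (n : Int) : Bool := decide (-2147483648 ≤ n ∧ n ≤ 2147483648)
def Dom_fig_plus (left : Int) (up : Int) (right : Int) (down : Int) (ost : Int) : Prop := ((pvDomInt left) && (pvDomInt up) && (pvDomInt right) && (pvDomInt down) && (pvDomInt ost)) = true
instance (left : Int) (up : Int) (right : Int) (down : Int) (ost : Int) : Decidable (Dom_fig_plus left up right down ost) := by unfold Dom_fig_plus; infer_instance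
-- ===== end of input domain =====

-- B replaces A's 16-entry 'ad' lookup table and its two reset-at-15 counters by the
-- closed-form masks x%15 ∈ {2,3}, 2 ≤ y%15 ≤ 9, precomputed as two offset lists (simpler).

-- ===== PORT A =====
-- literal transliteration of A ('iscl' is dead code and dropped; 'a = b = 14' inlined as the literal 14)
def fig_plus (left : Int) (up : Int) (right : Int) (down : Int) (ost : Int) : List (List Int) :=
  let mass : List (List Int) := []
  let left := left + ost
  let up := up + ost
  let right := right - ost
  let down := down - ost
  let ad : List (List Int) :=
    (PySem.List.pyRange 2 10 1).foldl (fun ad i =>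
      (PySem.List.pyRange 2 4 1).foldl (fun ad ii => ad ++ [[i, ii]]) ad) []
  let res := (PySem.List.pyRange 0 (right - left) 1).foldl
    (fun (st : List (List Int) × Int) x =>
      ((((PySem.List.pyRange 0 (down - up) 1).foldl
        (fun (st2 : List (List Int) × Int) y =>
          ((if [st2.2, st.2] ∈ ad then st2.1 ++ [[left + x, up + y]] else st2.1),
           (if st2.2 + 1 > 14 then 0 else st2.2 + 1))) (st.1, 0)).1),
       (if st.2 + 1 > 14 then 0 else st.2 + 1))) (mass, 0)
  res.1

-- ===== PORT B =====
-- transliteration of Source B ('x % 15 in (2, 3)' is x%15 == 2 || x%15 == 3; 'if not xs: return []' is the emptiness test)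
def fig_plus_alt (left : Int) (up : Int) (right : Int) (down : Int) (ost : Int) : List (List Int) :=
  let left := left + ost
  let up := up + ost
  let right := right - ost
  let down := down - ost
  let xs := (PySem.List.pyRange 0 (right - left) 1).filter (fun x => x % 15 == 2 || x % 15 == 3)
  if xs = [] then []
  else
    let ys := (PySem.List.pyRange 0 (down - up) 1).filter (fun y => 2 ≤ y % 15 && y % 15 ≤ 9)
    xs.flatMap (fun x => ys.map (fun y => [left + x, up + y]))

-- ===== PRECONDITION & SPEC =====
def Spec_fig_plus (left : Int) (up : Int) (right : Int) (down : Int) (ost : Int) (out : List (List Int)) : Prop := out = fig_plus_alt left up right down ost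
instance (left : Int) (up : Int) (right : Int) (down : Int) (ost : Int) (out : List (List Int)) : Decidable (Spec_fig_plus left up right down ost out) := by unfold Spec_fig_plus; infer_instance

-- ===== CLAIM (what is proved, stated in full; the proofs are below) =====
def Claim_equal_fig_plus : Prop := ∀ (left : Int) (up : Int) (right : Int) (down : Int) (ost : Int), Dom_fig_plus left up right down ost → Spec_fig_plus left up right down ost (fig_plus left up right down ost)

-- ===== LEMMAS AND PROOFS =====

-- the literal value of A's 'ad' table
def adL : List (List Int) :=
  [[2,2],[2,3],[3,2],[3,3],[4,2],[4,3],[5,2],[5,3],[6,2],[6,3],[7,2],[7,3],[8,2],[8,3],[9,2],[9,3]]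

theorem ad_eq :
    ((PySem.List.pyRange 2 10 1).foldl (fun ad i =>
      (PySem.List.pyRange 2 4 1).foldl (fun ad ii => ad ++ [[i, ii]]) ad) []) = adL := by
  decide

theorem mem_adL (p q : Int) : ([p, q] ∈ adL) ↔ (2 ≤ p ∧ p ≤ 9 ∧ (q = 2 ∨ q = 3)) := by
  simp [adL]
  omega

theorem pyRange_zero_toNat (N : Int) :
    PySem.List.pyRange 0 N 1 = PySem.List.pyRange 0 ((N.toNat : Int)) 1 := by
  by_cases h : N ≤ 0
  · rw [PySem.List.pyRange_one_eq_nil h, PySem.List.pyRange_one_eq_nil (by omega)]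
  · rw [Int.toNat_of_nonneg (by omega)]

theorem counter_step (n : Nat) :
    (if ((n : Int) % 15) + 1 > 14 then (0 : Int) else ((n : Int) % 15) + 1) = ((n : Int) + 1) % 15 := by
  omega

-- the inner loop: counter a0 equals y % 15, appends are a filtered map
theorem inner_loop (L U x b0 : Int) (n : Nat) (mass : List (List Int)) :
    ((PySem.List.pyRange 0 (n : Int) 1).foldl
      (fun (st2 : List (List Int) × Int) y =>
        ((if [st2.2, b0] ∈ adL then st2.1 ++ [[L + x, U + y]] else st2.1),
         (if st2.2 + 1 > 14 then 0 else st2.2 + 1))) (mass, 0))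
    = (mass ++ ((PySem.List.pyRange 0 (n : Int) 1).filter
          (fun y => decide ([y % 15, b0] ∈ adL))).map (fun y => [L + x, U + y]),
       (n : Int) % 15) := by
  induction n generalizing mass with
  | zero => simp [PySem.List.pyRange_one_eq_nil (le_refl (0 : Int))]
  | succ k ih =>
      have hr : PySem.List.pyRange 0 ((k : Int) + 1) 1
          = PySem.List.pyRange 0 (k : Int) 1 ++ [(k : Int)] :=
        PySem.List.pyRange_one_succ_right (by positivity)
      push_cast
      rw [hr, List.foldl_append, ih, List.filter_append, List.map_append]
      by_cases h : [(k : Int) % 15, b0] ∈ adL <;> simp [h] <;> omega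

-- the outer loop: counter b0 equals x % 15
theorem outer_loop (L U : Int) (nY : Nat) (m : Nat) (mass : List (List Int)) :
    ((PySem.List.pyRange 0 (m : Int) 1).foldl
      (fun (st : List (List Int) × Int) x =>
        ((((PySem.List.pyRange 0 (nY : Int) 1).foldl
          (fun (st2 : List (List Int) × Int) y =>
            ((if [st2.2, st.2] ∈ adL then st2.1 ++ [[L + x, U + y]] else st2.1),
             (if st2.2 + 1 > 14 then 0 else st2.2 + 1))) (st.1, 0)).1),
         (if st.2 + 1 > 14 then 0 else st.2 + 1))) (mass, 0))
    = (mass ++ (PySem.List.pyRange 0 (m : Int) 1).flatMap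
          (fun x => ((PySem.List.pyRange 0 (nY : Int) 1).filter
            (fun y => decide ([y % 15, x % 15] ∈ adL))).map (fun y => [L + x, U + y])),
       (m : Int) % 15) := by
  induction m generalizing mass with
  | zero => simp [PySem.List.pyRange_one_eq_nil (le_refl (0 : Int))]
  | succ k ih =>
      have hr : PySem.List.pyRange 0 ((k : Int) + 1) 1
          = PySem.List.pyRange 0 (k : Int) 1 ++ [(k : Int)] :=
        PySem.List.pyRange_one_succ_right (by positivity)
      push_cast
      rw [hr, List.foldl_append, ih, List.flatMap_append]
      simp only [List.foldl_cons, List.foldl_nil, inner_loop, counter_step k]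
      simp

theorem flatMap_if_filter {α β : Type} (p : α → Bool) (g : α → List β) (l : List α) :
    l.flatMap (fun x => if p x then g x else []) = (l.filter p).flatMap g := by
  induction l with
  | nil => rfl
  | cons a t ih =>
      by_cases h : p a <;> simp [h, ih]

theorem block_eq (L U : Int) (ys : List Int) (x : Int) :
    (ys.filter (fun y => decide ([y % 15, x % 15] ∈ adL))).map (fun y => [L + x, U + y])
    = if (x % 15 == 2 || x % 15 == 3)
      then (ys.filter (fun y => 2 ≤ y % 15 && y % 15 ≤ 9)).map (fun y => [L + x, U + y])
      else [] := by
  by_cases h : x % 15 = 2 ∨ x % 15 = 3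
  · have hp : (fun y : Int => decide ([y % 15, x % 15] ∈ adL))
        = (fun y : Int => 2 ≤ y % 15 && y % 15 ≤ 9) := by
      funext y
      rw [Bool.eq_iff_iff]
      simp only [Bool.and_eq_true, decide_eq_true_eq, mem_adL]
      omega
    have hb : (x % 15 == 2 || x % 15 == 3) = true := by
      rcases h with h | h <;> simp [h]
    rw [hp, hb]
    simp
  · have hp : (fun y : Int => decide ([y % 15, x % 15] ∈ adL)) = (fun _ : Int => false) := by
      funext y
      simp only [decide_eq_false_iff_not, mem_adL]
      omega
    have hb : (x % 15 == 2 || x % 15 == 3) = false := by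
      simp only [Bool.or_eq_false_iff, beq_eq_false_iff_ne]
      omega
    rw [hp, hb]
    simp

-- ===== VERDICT (by name: the statement is the Claim_ definition above) =====
theorem fig_plus_spec : Claim_equal_fig_plus := by
  intro left up right down ost _
  show fig_plus left up right down ost = fig_plus_alt left up right down ost
  unfold fig_plus fig_plus_alt
  simp only [ad_eq]
  rw [pyRange_zero_toNat (right - ost - (left + ost)),
      pyRange_zero_toNat (down - ost - (up + ost)),
      outer_loop]
  simp only [Int.ofNat_toNat, List.nil_append]
  have key :
      (PySem.List.pyRange 0 (max (right - ost - (left + ost)) 0) 1).flatMap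
        (fun x => ((PySem.List.pyRange 0 (max (down - ost - (up + ost)) 0) 1).filter
          (fun y => decide ([y % 15, x % 15] ∈ adL))).map
            (fun y => [left + ost + x, up + ost + y]))
      = ((PySem.List.pyRange 0 (max (right - ost - (left + ost)) 0) 1).filter
          (fun x => x % 15 == 2 || x % 15 == 3)).flatMap
        (fun x => ((PySem.List.pyRange 0 (max (down - ost - (up + ost)) 0) 1).filter
          (fun y => 2 ≤ y % 15 && y % 15 ≤ 9)).map
            (fun y => [left + ost + x, up + ost + y])) := by
    rw [← flatMap_if_filter]
    exact List.flatMap_congr (fun x _ => block_eq (left + ost) (up + ost) _ x)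
  by_cases hxs : ((PySem.List.pyRange 0 (max (right - ost - (left + ost)) 0) 1).filter
      (fun x => x % 15 == 2 || x % 15 == 3)) = []
  · rw [if_pos hxs]
    rw [key, hxs, List.flatMap_nil]
  · rw [if_neg hxs]
    exact key
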